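-- pv_equiv track=rewrite | github.com/MichaelPanW/ImageSlicer | main.py | find_continuous_false_ranges
-- ===== SOURCE A (Python) =====
-- def find_continuous_false_ranges(boolean_array):
--     """
--     找到布林陣列中連續的False區域。
--
--     Parameters:
--     - boolean_array: list
--         布林陣列。
--
--     Returns:
--     - false_ranges: list of tuples
--         連續的False區域，每個區域用一個元組表示（起始索引，結束索引）。
--     """
--     false_ranges = []
--     current_range = None
--
--     for i, value in enumerate(boolean_array):
--         if not value:  # 當遇到 False 時
--             if current_range is None:
--                 current_range = [i, i]
--             else:
--                 current_range[1] = i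
--         elif current_range is not None:
--             # 添加長度檢查
--             false_ranges.append(tuple(current_range))
--             current_range = None
--
--     # 處理最後一個範圍
--     if current_range is not None:
--         false_ranges.append(tuple(current_range))
--     return false_ranges
-- ===== SOURCE B (Python) =====
-- def find_continuous_false_ranges(boolean_array):
--     """Two-phase: run-length encode by truthiness, then emit ranges for falsy runs."""
--     # phase 1: break the array into maximal runs of equal truthiness (key, length)
--     runs = []
--     i = 0
--     while i < len(boolean_array):
--         k = bool(boolean_array[i])
--         n = 1
--         while i + n < len(boolean_array) and bool(boolean_array[i + n]) == k:
--             n += 1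
--         runs.append((k, n))
--         i += n
--     # phase 2: walk the runs with a running start index, emitting falsy runs
--     false_ranges = []
--     start = 0
--     for k, n in runs:
--         if not k:
--             false_ranges.append((start, start + n - 1))
--         start += n
--     return false_ranges
-- ===== Notes on version B (the rewrite author's own statement) =====
-- stated objective: alternative
-- what changed: Replaces A's single-pass current_range state machine with a two-phase pass: run-length encode the array into maximal runs of equal truthiness, then emit (start, start+len-1) for each falsy run while advancing a running index.
import Mathlib
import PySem

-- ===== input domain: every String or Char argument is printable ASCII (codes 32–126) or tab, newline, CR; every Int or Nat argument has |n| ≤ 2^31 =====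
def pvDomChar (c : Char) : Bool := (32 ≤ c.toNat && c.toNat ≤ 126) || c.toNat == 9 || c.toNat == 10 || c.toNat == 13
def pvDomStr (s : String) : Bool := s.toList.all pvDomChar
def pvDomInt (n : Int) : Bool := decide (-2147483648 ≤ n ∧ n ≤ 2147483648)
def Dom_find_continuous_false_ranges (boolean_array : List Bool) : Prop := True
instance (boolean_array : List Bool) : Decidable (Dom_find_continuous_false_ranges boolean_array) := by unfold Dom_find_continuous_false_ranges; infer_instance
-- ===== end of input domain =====

-- B replaces A's single-pass current_range state machine with a two-phase pass
-- (run-length encode by truthiness, then emit falsy runs); objective: alternative.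

-- ===== PORT A =====
-- A's loop over enumerate(boolean_array) with state (false_ranges, current_range).
def find_continuous_false_ranges (boolean_array : List Bool) : List (Int × Int) :=
  let st := (PySem.List.enumerate boolean_array).foldl
    (fun (st : List (Int × Int) × Option (Int × Int)) (p : Int × Bool) =>
      let (false_ranges, current_range) := st
      if !p.2 then
        match current_range with
        | none => (false_ranges, some (p.1, p.1))
        | some (a, _) => (false_ranges, some (a, p.1))
      else
        match current_range with
        | some r => (false_ranges ++ [r], none)
        | none => (false_ranges, none))
    ([], none)
  match st.2 with
  | some r => st.1 ++ [r]
  | none => st.1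

-- ===== PORT B =====
-- Source B phase 1: maximal runs of equal truthiness; the inner while loop counting
-- the matching prefix is ported as takeWhile-length / dropWhile on the rest.
def pvRuns : List Bool → List (Bool × Nat)
  | [] => []
  | x :: xs =>
    (x, 1 + (xs.takeWhile (fun y => y = x)).length) :: pvRuns (xs.dropWhile (fun y => y = x))
termination_by xs => xs.length
decreasing_by
  exact Nat.lt_succ_of_le (List.length_dropWhile_le _ _)

-- Source B phase 2: fold over the runs with state (false_ranges, start).
def find_continuous_false_ranges_alt (boolean_array : List Bool) : List (Int × Int) :=
  ((pvRuns boolean_array).foldl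
    (fun (st : List (Int × Int) × Int) (g : Bool × Nat) =>
      ((if g.1 then st.1 else st.1 ++ [(st.2, st.2 + (g.2 : Int) - 1)]), st.2 + (g.2 : Int)))
    ([], 0)).1

-- ===== PRECONDITION & SPEC =====
def Spec_find_continuous_false_ranges (boolean_array : List Bool) (out : List (Int × Int)) : Prop := out = find_continuous_false_ranges_alt boolean_array
instance (boolean_array : List Bool) (out : List (Int × Int)) : Decidable (Spec_find_continuous_false_ranges boolean_array out) := by unfold Spec_find_continuous_false_ranges; infer_instance

-- ===== CLAIM (what is proved, stated in full; the proofs are below) =====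
def Claim_equal_find_continuous_false_ranges : Prop := ∀ (boolean_array : List Bool), Dom_find_continuous_false_ranges boolean_array → Spec_find_continuous_false_ranges boolean_array (find_continuous_false_ranges boolean_array)

-- ===== LEMMAS AND PROOFS =====

-- Recursive rendering of A's loop (proof helper).
def loopA (xs : List Bool) (i : Int) (acc : List (Int × Int)) (cur : Option (Int × Int)) :
    List (Int × Int) :=
  match xs with
  | [] => match cur with | some r => acc ++ [r] | none => acc
  | v :: rest =>
    if !v then
      match cur with
      | none => loopA rest (i + 1) acc (some (i, i))
      | some (a, _) => loopA rest (i + 1) acc (some (a, i))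
    else
      match cur with
      | some r => loopA rest (i + 1) (acc ++ [r]) none
      | none => loopA rest (i + 1) acc none

theorem loopA_eq_foldA (xs : List Bool) (i : Int) (acc : List (Int × Int))
    (cur : Option (Int × Int)) :
    loopA xs i acc cur =
      (let st := (PySem.List.enumerate xs i).foldl
        (fun (st : List (Int × Int) × Option (Int × Int)) (p : Int × Bool) =>
          let (false_ranges, current_range) := st
          if !p.2 then
            match current_range with
            | none => (false_ranges, some (p.1, p.1))
            | some (a, _) => (false_ranges, some (a, p.1))
          else
            match current_range with
            | some r => (false_ranges ++ [r], none)
            | none => (false_ranges, none))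
        (acc, cur)
      match st.2 with
      | some r => st.1 ++ [r]
      | none => st.1) := by
  induction xs generalizing i acc cur with
  | nil => simp [loopA, PySem.List.enumerate_nil]
  | cons v rest ih =>
    simp only [PySem.List.enumerate_cons, List.foldl_cons]
    cases v <;> cases cur <;> simp [loopA, ih]


theorem loopA_falses : ∀ (rest : List Bool) (j b : Int) (acc : List (Int × Int)) (a : Int),
    b = j - 1 →
    loopA rest j acc (some (a, b)) =
      loopA (rest.dropWhile (fun y => y = false))
        (j + ((rest.takeWhile (fun y => y = false)).length : Int)) acc
        (some (a, j + ((rest.takeWhile (fun y => y = false)).length : Int) - 1)) := by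
  intro rest
  induction rest with
  | nil => intro j b acc a hb; simp [hb]
  | cons y t ih =>
    intro j b acc a hb
    cases y with
    | false =>
      simp only [List.takeWhile_cons, List.dropWhile_cons, decide_true, loopA, Bool.not_false,
        if_pos rfl, decide_eq_true_eq, if_pos rfl]
      rw [ih (j + 1) j acc a (by ring)]
      have hL : (((false :: List.takeWhile (fun y => decide (y = false)) t).length : Nat) : Int)
          = ((List.takeWhile (fun y => decide (y = false)) t).length : Int) + 1 := by
        rw [List.length_cons]; push_cast; ring
      simp only [if_pos trivial]
      rw [hL]; ring_nf
    | true =>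
      simp only [List.takeWhile_cons, List.dropWhile_cons]
      norm_num [hb]

theorem loopA_trues : ∀ (rest : List Bool) (j : Int) (acc : List (Int × Int)),
    loopA rest j acc none =
      loopA (rest.dropWhile (fun y => y = true))
        (j + ((rest.takeWhile (fun y => y = true)).length : Int)) acc none := by
  intro rest
  induction rest with
  | nil => intro j acc; simp
  | cons y t ih =>
    intro j acc
    cases y with
    | true =>
      simp only [List.takeWhile_cons, List.dropWhile_cons, decide_true, decide_eq_true_eq,
        if_pos rfl, loopA, Bool.not_true]
      rw [if_neg (by simp), ih (j + 1) acc]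
      have hL : (((true :: List.takeWhile (fun y => decide (y = true)) t).length : Nat) : Int)
          = ((List.takeWhile (fun y => decide (y = true)) t).length : Int) + 1 := by
        rw [List.length_cons]; push_cast; ring
      simp only [if_pos trivial]
      rw [hL]; ring_nf
    | false =>
      simp only [List.takeWhile_cons, List.dropWhile_cons]
      norm_num

theorem head_dropWhile_false {α : Type} (p : α → Bool) (xs : List α) (c : α) (t : List α)
    (h : xs.dropWhile p = c :: t) : p c = false := by
  induction xs with
  | nil => simp [List.dropWhile] at h
  | cons x xs ih =>
    by_cases hx : p x = true
    · exact ih (by simpa [List.dropWhile, hx] using h)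
    · simp [List.dropWhile, hx] at h
      simp [← h.1, Bool.eq_false_iff.mpr hx]

theorem main_lemma : ∀ (xs : List Bool) (i : Int) (acc : List (Int × Int)),
    loopA xs i acc none =
      ((pvRuns xs).foldl
        (fun (st : List (Int × Int) × Int) (g : Bool × Nat) =>
          ((if g.1 then st.1 else st.1 ++ [(st.2, st.2 + (g.2 : Int) - 1)]), st.2 + (g.2 : Int)))
        (acc, i)).1 := by
  intro xs
  induction xs using pvRuns.induct with
  | case1 => intro i acc; simp [loopA, pvRuns]
  | case2 x rest ih =>
    intro i acc
    rw [pvRuns]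
    cases x with
    | true =>
      have h1 : loopA (true :: rest) i acc none = loopA rest (i + 1) acc none := by
        simp [loopA]
      rw [h1, loopA_trues rest (i + 1) acc, ih, List.foldl_cons]
      simp only [if_pos rfl]
      congr 2
      push_cast; ring
    | false =>
      have h1 : loopA (false :: rest) i acc none = loopA rest (i + 1) acc (some (i, i)) := by
        simp [loopA]
      rw [h1, loopA_falses rest (i + 1) i acc i (by ring)]
      simp only [List.foldl_cons, if_neg (by simp : ¬((false, 1 + (List.takeWhile (fun y => y = false) rest).length) : Bool × Nat).1 = true)]
      cases hdc : rest.dropWhile (fun y => y = false) with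
      | nil =>
        simp only [loopA, pvRuns]
        simp only [List.foldl_nil]
        congr 2
        push_cast; ring
      | cons c dtail =>
        have hc : c = true := by
          have := head_dropWhile_false (fun y => y = false) rest c dtail hdc
          simpa using this
        subst hc
        have h2 : loopA (true :: dtail) (i + 1 + ((rest.takeWhile (fun y => y = false)).length : Int))
            (acc ++ [(i, i + 1 + ((rest.takeWhile (fun y => y = false)).length : Int) - 1)]) none =
            loopA dtail (i + 1 + ((rest.takeWhile (fun y => y = false)).length : Int) + 1)
            (acc ++ [(i, i + 1 + ((rest.takeWhile (fun y => y = false)).length : Int) - 1)]) none := by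
          simp [loopA]
        have h3 := ih (i + 1 + ((rest.takeWhile (fun y => y = false)).length : Int))
          (acc ++ [(i, i + 1 + ((rest.takeWhile (fun y => y = false)).length : Int) - 1)])
        rw [hdc] at h3
        have hcur : loopA (true :: dtail) (i + 1 + ((rest.takeWhile (fun y => y = false)).length : Int)) acc
            (some (i, i + 1 + ((rest.takeWhile (fun y => y = false)).length : Int) - 1)) =
            loopA dtail (i + 1 + ((rest.takeWhile (fun y => y = false)).length : Int) + 1)
            (acc ++ [(i, i + 1 + ((rest.takeWhile (fun y => y = false)).length : Int) - 1)]) none := by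
          simp [loopA]
        rw [hcur, ← h2, h3]
        have hL2 : (((1 + (List.takeWhile (fun y => decide (y = false)) rest).length : Nat)) : Int)
            = 1 + ((List.takeWhile (fun y => decide (y = false)) rest).length : Int) := by
          push_cast; ring
        rw [hL2]; ring_nf


-- ===== VERDICT (by name: the statement is the Claim_ definition above) =====
theorem find_continuous_false_ranges_spec : Claim_equal_find_continuous_false_ranges := by
  intro xs _
  unfold Spec_find_continuous_false_ranges find_continuous_false_ranges find_continuous_false_ranges_alt
  rw [← loopA_eq_foldA]
  exact main_lemma xs 0 []
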